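-- pv_equiv track=rewrite | github.com/dmitriypereverza/python-lessons | lesson4/hw1-normal.py | get_matches_first_task_without_re
-- ===== SOURCE A (Python) =====
-- def get_matches_first_task_without_re(line):
--     """
--     >>> get_matches_first_task_without_re('sGAMkgAYEOmHBSQsSUHKvS')
--     ['s', 'kg', 'm', 's', 'v']
--     >>> get_matches_first_task_without_re('mtMmEZUOmcqWiryMQhhTxqKdSTKCYE')
--     ['mt', 'm', 'mcq', 'iry', 'hh', 'xq', 'd']
--     """
--     resultList = []
--     currentString = ''
--     for char in line:
--         if char.isupper():
--             if len(currentString):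
--                 resultList.append(currentString)
--                 currentString = ''
--             continue
--         currentString += char
--     return resultList
-- ===== SOURCE B (Python) =====
-- def get_matches_first_task_without_re(line):
--     # Group the string into maximal runs keyed by isupper(), drop a trailing
--     # lowercase-run (it is unterminated), then emit all non-upper runs.
--     groups = []
--     i, n = 0, len(line)
--     while i < n:
--         k = line[i].isupper()
--         j = i + 1
--         while j < n and line[j].isupper() == k:
--             j += 1
--         groups.append((k, line[i:j]))
--         i = j
--     if groups and not groups[-1][0]:
--         groups.pop()
--     return [s for k, s in groups if not k]
-- ===== Notes on version B (the rewrite author's own statement) =====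
-- stated objective: alternative
-- what changed: B first splits the string into maximal runs of equal isupper()-key via an index/span scan, drops a trailing lowercase run, and then emits all lowercase runs in one filtering pass, replacing A's incremental accumulate-and-flush character loop.
import Mathlib
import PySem

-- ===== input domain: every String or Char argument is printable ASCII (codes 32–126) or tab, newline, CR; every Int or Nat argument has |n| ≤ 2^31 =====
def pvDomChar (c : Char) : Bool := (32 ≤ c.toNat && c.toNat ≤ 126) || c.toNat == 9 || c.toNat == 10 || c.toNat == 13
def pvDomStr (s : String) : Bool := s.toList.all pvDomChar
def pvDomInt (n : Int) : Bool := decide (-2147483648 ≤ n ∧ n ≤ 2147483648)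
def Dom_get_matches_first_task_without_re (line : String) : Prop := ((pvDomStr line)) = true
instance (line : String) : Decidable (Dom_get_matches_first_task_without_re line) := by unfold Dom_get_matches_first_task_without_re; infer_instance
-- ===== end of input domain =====

-- B groups the string into maximal isupper-runs up front, drops a trailing lowercase run, and
-- emits the non-upper runs, instead of A's incremental accumulate-and-flush loop; objective: alternative.

-- ===== PORT A =====
-- A's loop body: on an uppercase char flush currentString (kept as List Char) if nonempty, else extend it
def pvStepA (st : List String × List Char) (c : Char) : List String × List Char :=
  if PySem.Chars.isupper c then
    if st.2.length ≠ 0 then (st.1 ++ [String.ofList st.2], []) else st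
  else (st.1, st.2 ++ [c])

def get_matches_first_task_without_re (line : String) : List String :=
  (line.toList.foldl pvStepA ([], [])).1

-- ===== PORT B =====
-- the outer while loop of Source B: peel off the maximal run with the same isupper key, recurse on the rest
def pvGroups (l : List Char) : List (Bool × List Char) :=
  match l with
  | [] => []
  | c :: cs =>
    (PySem.Chars.isupper c,
      c :: cs.takeWhile (fun x => PySem.Chars.isupper x == PySem.Chars.isupper c)) ::
      pvGroups (cs.dropWhile (fun x => PySem.Chars.isupper x == PySem.Chars.isupper c))
termination_by l.length
decreasing_by
  simpa using Nat.lt_succ_of_le (List.length_dropWhile_le _ _)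

def get_matches_first_task_without_re_alt (line : String) : List String :=
  let groups := pvGroups line.toList
  let groups' :=
    match groups.getLast? with
    | some (false, _) => groups.dropLast     -- if groups and not groups[-1][0]: groups.pop()
    | _ => groups
  groups'.filterMap (fun p : Bool × List Char => if p.1 then none else some (String.ofList p.2))

-- ===== PRECONDITION & SPEC =====
def Spec_get_matches_first_task_without_re (line : String) (out : List String) : Prop := out = get_matches_first_task_without_re_alt line
instance (line : String) (out : List String) : Decidable (Spec_get_matches_first_task_without_re line out) := by unfold Spec_get_matches_first_task_without_re; infer_instance

-- ===== CLAIM (what is proved, stated in full; the proofs are below) =====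
def Claim_equal_get_matches_first_task_without_re : Prop := ∀ (line : String), Dom_get_matches_first_task_without_re line → Spec_get_matches_first_task_without_re line (get_matches_first_task_without_re line)

-- ===== LEMMAS AND PROOFS =====

-- A's loop, written as structural recursion on the remaining characters
def pvG (cur : List Char) : List Char → List String
  | [] => []
  | c :: t =>
    if PySem.Chars.isupper c then
      (if cur = [] then pvG [] t else String.ofList cur :: pvG [] t)
    else pvG (cur ++ [c]) t

-- B's filtering, written as a scan over the group list with a pending lowercase prefix
def pvE (cur : List Char) : List (Bool × List Char) → List String
  | [] => []
  | (true, _) :: t => (if cur = [] then [] else [String.ofList cur]) ++ pvE [] t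
  | (false, g) :: t => pvE (cur ++ g) t

-- groups are nonempty and adjacent groups have different keys
def pvOk (G : List (Bool × List Char)) : Prop :=
  (∀ p ∈ G, p.2 ≠ []) ∧ G.IsChain (fun a b => a.1 ≠ b.1)

-- B's drop-trailing-then-filter pass, as a function of the group list
def pvFilt (G : List (Bool × List Char)) : List String :=
  (match G.getLast? with
    | some (false, _) => G.dropLast
    | _ => G).filterMap (fun p : Bool × List Char => if p.1 then none else some (String.ofList p.2))

theorem pvFoldA (l : List Char) : ∀ (res : List String) (cur : List Char),
    (l.foldl pvStepA (res, cur)).1 = res ++ pvG cur l := by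
  induction l with
  | nil => intro res cur; simp [pvG]
  | cons c t ih =>
    intro res cur
    rw [List.foldl_cons]
    by_cases h : PySem.Chars.isupper c
    · by_cases hc : cur = []
      · have hs : pvStepA (res, cur) c = (res, cur) := by simp [pvStepA, h, hc]
        rw [hs, ih]
        simp [pvG, h, hc]
      · have hs : pvStepA (res, cur) c = (res ++ [String.ofList cur], []) := by
          simp [pvStepA, h, hc]
        rw [hs, ih]
        simp [pvG, h, hc]
    · have hs : pvStepA (res, cur) c = (res, cur ++ [c]) := by simp [pvStepA, h]
      rw [hs, ih]
      simp [pvG, h]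

theorem pvG_skip_upper (grp : List Char) (rest : List Char)
    (h : ∀ x ∈ grp, PySem.Chars.isupper x = true) :
    pvG [] (grp ++ rest) = pvG [] rest := by
  induction grp with
  | nil => rfl
  | cons a t ih =>
    have ha := h a (by simp)
    simp only [List.cons_append, pvG, ha, if_true]
    exact ih (fun x hx => h x (by simp [hx]))

theorem pvG_acc_lower (grp : List Char) : ∀ (cur rest : List Char),
    (∀ x ∈ grp, PySem.Chars.isupper x = false) →
    pvG cur (grp ++ rest) = pvG (cur ++ grp) rest := by
  induction grp with
  | nil => intro cur rest _; simp
  | cons a t ih =>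
    intro cur rest h
    have ha := h a (by simp)
    simp only [List.cons_append, pvG, ha, Bool.false_eq_true, if_false]
    rw [ih (cur ++ [a]) rest (fun x hx => h x (by simp [hx]))]
    simp

theorem pvHead_dropWhile (p : Char → Bool) (l : List Char) :
    ∀ x ∈ (l.dropWhile p).head?, p x = false := by
  induction l with
  | nil => simp
  | cons a t ih =>
    by_cases h : p a
    · simpa [h] using ih
    · simp [h]

theorem pvGroups_ok_aux (n : Nat) : ∀ (l : List Char), l.length ≤ n → pvOk (pvGroups l) := by
  induction n with
  | zero =>
    intro l hl
    have : l = [] := List.eq_nil_of_length_eq_zero (Nat.le_zero.mp hl)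
    subst this
    exact ⟨by simp [pvGroups], by rw [pvGroups]; exact List.isChain_nil⟩
  | succ n ih =>
    intro l hl
    cases l with
    | nil => exact ⟨by simp [pvGroups], by rw [pvGroups]; exact List.isChain_nil⟩
    | cons c cs =>
      have hrec : (cs.dropWhile (fun x => PySem.Chars.isupper x == PySem.Chars.isupper c)).length ≤ n :=
        le_trans (List.length_dropWhile_le _ _) (by simpa using hl)
      obtain ⟨ihne, ihch⟩ := ih _ hrec
      rw [pvGroups]
      constructor
      · intro p hp
        rcases List.mem_cons.mp hp with h | h
        · simp [h]
        · exact ihne p h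
      · refine List.isChain_cons.mpr ⟨?_, ihch⟩
        intro b hb
        cases hrest : cs.dropWhile (fun x => PySem.Chars.isupper x == PySem.Chars.isupper c) with
        | nil => rw [hrest] at hb; simp [pvGroups] at hb
        | cons r rs =>
          rw [hrest] at hb
          rw [pvGroups] at hb
          simp only [List.head?_cons, Option.mem_def, Option.some.injEq] at hb
          have hr : PySem.Chars.isupper r ≠ PySem.Chars.isupper c := by
            have := pvHead_dropWhile (fun x => PySem.Chars.isupper x == PySem.Chars.isupper c) cs r
              (by rw [hrest]; simp)
            simpa using this
          subst hb
          simpa using fun h => hr h.symm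

theorem pvG_eq_pvE_aux (n : Nat) : ∀ (l : List Char), l.length ≤ n →
    ∀ cur, pvG cur l = pvE cur (pvGroups l) := by
  induction n with
  | zero =>
    intro l hl cur
    have : l = [] := List.eq_nil_of_length_eq_zero (Nat.le_zero.mp hl)
    subst this
    simp [pvGroups, pvG, pvE]
  | succ n ih =>
    intro l hl cur
    cases l with
    | nil => simp [pvGroups, pvG, pvE]
    | cons c cs =>
      have hrec : (cs.dropWhile (fun x => PySem.Chars.isupper x == PySem.Chars.isupper c)).length ≤ n :=
        le_trans (List.length_dropWhile_le _ _) (by simpa using hl)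
      rw [pvGroups]
      set tw := cs.takeWhile (fun x => PySem.Chars.isupper x == PySem.Chars.isupper c) with htw
      set rest := cs.dropWhile (fun x => PySem.Chars.isupper x == PySem.Chars.isupper c) with hrest
      have hsplit : cs = tw ++ rest := (List.takeWhile_append_dropWhile).symm
      by_cases hk : PySem.Chars.isupper c
      · rw [show (PySem.Chars.isupper c) = true from hk]
        rw [pvE]
        have hstep : pvG cur (c :: cs) =
            (if cur = [] then [] else [String.ofList cur]) ++ pvG [] cs := by
          by_cases hc : cur = [] <;> simp [pvG, hk, hc]
        rw [hstep]
        congr 1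
        conv_lhs => rw [hsplit]
        rw [pvG_skip_upper _ _ (fun x hx => by
          have := List.mem_takeWhile_imp (htw ▸ hx)
          simpa [hk] using this)]
        exact ih _ hrec []
      · have hkk : PySem.Chars.isupper c = false := by simpa using hk
        rw [show (PySem.Chars.isupper c) = false from hkk]
        rw [pvE]
        have hstep : pvG cur (c :: cs) = pvG (cur ++ [c]) cs := by simp [pvG, hk]
        rw [hstep]
        conv_lhs => rw [hsplit]
        rw [pvG_acc_lower _ _ _ (fun x hx => by
          have := List.mem_takeWhile_imp (htw ▸ hx)
          simpa [hkk] using this)]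
        rw [ih _ hrec]
        simp

theorem pvE_eq_pvFilt_aux (n : Nat) : ∀ (G : List (Bool × List Char)), G.length ≤ n →
    pvOk G → pvE [] G = pvFilt G := by
  induction n with
  | zero =>
    intro G hG _
    have : G = [] := List.eq_nil_of_length_eq_zero (Nat.le_zero.mp hG)
    subst this; rfl
  | succ n ih =>
    intro G hG h
    obtain ⟨hne, hch⟩ := h
    rcases G with _ | ⟨⟨k, g⟩, t⟩
    · rfl
    · cases k
      · -- leading lowercase group
        have hg : g ≠ [] := by simpa using hne (false, g) (by simp)
        rcases t with _ | ⟨⟨k2, g2⟩, t2⟩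
        · simp [pvE, pvFilt]
        · have hk2 : k2 = true := by
            have hne2 : ¬((false : Bool) = k2) := by
              simpa using (List.isChain_cons.mp hch).1 (k2, g2) (by simp)
            cases k2
            · exact absurd rfl hne2
            · rfl
          subst hk2
          have ht2 : pvOk t2 := by
            have h1 := List.isChain_cons.mp hch
            have h2 := List.isChain_cons.mp h1.2
            exact ⟨fun p hp => hne p (by simp [hp]), h2.2⟩
          have hlen : t2.length ≤ n := by simp at hG; omega
          have iht2 := ih t2 hlen ht2
          have lhs : pvE [] ((false, g) :: (true, g2) :: t2) = String.ofList g :: pvE [] t2 := by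
            simp [pvE, hg]
          rw [lhs, iht2]
          unfold pvFilt
          rw [List.getLast?_cons_cons]
          rcases t2 with _ | ⟨q, t3⟩
          · simp
          · rw [List.getLast?_cons_cons]
            cases hL : (q :: t3).getLast? with
              | none => simp at hL
              | some p =>
                obtain ⟨kl, gl⟩ := p
                cases kl
                · simp [List.dropLast_cons₂]
                · simp
      · -- leading uppercase group
        have ht : pvOk t := ⟨fun p hp => hne p (by simp [hp]), (List.isChain_cons.mp hch).2⟩
        have hlen : t.length ≤ n := by simp at hG; omega
        have iht := ih t hlen ht
        rcases t with _ | ⟨h2, ts⟩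
        · simp [pvE, pvFilt]
        · have lhs : pvE [] ((true, g) :: h2 :: ts) = pvE [] (h2 :: ts) := by simp [pvE]
          rw [lhs, iht]
          unfold pvFilt
          rw [List.getLast?_cons_cons]
          cases hL : (h2 :: ts).getLast? with
          | none => simp at hL
          | some p =>
            obtain ⟨kl, gl⟩ := p
            cases kl
            · simp [List.dropLast_cons₂]
            · simp [List.filterMap_cons]

theorem pvAlt_eq (line : String) :
    get_matches_first_task_without_re_alt line = pvFilt (pvGroups line.toList) := by
  simp only [get_matches_first_task_without_re_alt, pvFilt]

-- ===== VERDICT (by name: the statement is the Claim_ definition above) =====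
theorem get_matches_first_task_without_re_spec : Claim_equal_get_matches_first_task_without_re := by
  intro line _
  unfold Spec_get_matches_first_task_without_re
  rw [pvAlt_eq, ← pvE_eq_pvFilt_aux (pvGroups line.toList).length _ le_rfl
        (pvGroups_ok_aux line.toList.length _ le_rfl),
    ← pvG_eq_pvE_aux line.toList.length _ le_rfl]
  unfold get_matches_first_task_without_re
  rw [pvFoldA]
  simp
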